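-- pv_equiv track=rewrite | github.com/shailrshah/Bulls-and-Cows | Bulls and Cows.py | no_of_lines
-- ===== SOURCE A (Python) =====
-- def no_of_lines(n):
--     # Number of different 4 digit integers with no digit repeated = 9*9*8*7 = 4536
--     mul = 1
--     for i in range(1, n+1):
--         if i == 1:
--             mul *= 9
--         else:
--             mul *= (9-i+2)
--     return mul
-- ===== SOURCE B (Python) =====
-- # B: O(1) table lookup of the 11 possible products (clamped below at 0, zero above 10)
-- # instead of A's O(n) multiplication loop.
-- _TABLE = (1, 9, 81, 648, 4536, 27216, 136080, 544320, 1632960, 3265920, 3265920)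
--
-- def no_of_lines(n):
--     if n < 0:
--         n = 0
--     if n > 10:
--         return 0
--     return _TABLE[n]
-- ===== Notes on version B (the rewrite author's own statement) =====
-- stated objective: faster
-- what changed: Replaces the multiplication loop by a precomputed 11-entry lookup table (clamping n below 0 and returning 0 above 10, where A's product hits a zero factor).
import Mathlib
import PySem

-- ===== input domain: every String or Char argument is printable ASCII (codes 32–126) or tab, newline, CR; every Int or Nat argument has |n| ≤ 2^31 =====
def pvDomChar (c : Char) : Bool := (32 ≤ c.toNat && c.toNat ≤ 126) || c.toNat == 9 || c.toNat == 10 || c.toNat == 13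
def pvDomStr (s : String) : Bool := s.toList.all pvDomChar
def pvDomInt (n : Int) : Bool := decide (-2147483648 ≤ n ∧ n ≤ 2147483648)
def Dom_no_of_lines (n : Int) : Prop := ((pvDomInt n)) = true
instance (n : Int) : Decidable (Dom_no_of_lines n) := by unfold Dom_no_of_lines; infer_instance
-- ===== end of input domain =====

-- B replaces A's O(n) multiplication loop by an O(1) precomputed 11-entry table lookup.

-- ===== PORT A =====
def no_of_lines (n : Int) : Int :=
  (PySem.List.pyRange 1 (n + 1) 1).foldl
    (fun mul i => if i == 1 then mul * 9 else mul * (9 - i + 2)) 1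

-- ===== PORT B =====
def pvTable : List Int := [1, 9, 81, 648, 4536, 27216, 136080, 544320, 1632960, 3265920, 3265920]

def no_of_lines_alt (n : Int) : Int :=
  let m := if n < 0 then 0 else n
  if m > 10 then 0 else PySem.List.pyGetD pvTable m 0

-- ===== PRECONDITION & SPEC =====
def Spec_no_of_lines (n : Int) (out : Int) : Prop := out = no_of_lines_alt n
instance (n : Int) (out : Int) : Decidable (Spec_no_of_lines n out) := by unfold Spec_no_of_lines; infer_instance

-- ===== CLAIM (what is proved, stated in full; the proofs are below) =====
def Claim_equal_no_of_lines : Prop := ∀ (n : Int), Dom_no_of_lines n → Spec_no_of_lines n (no_of_lines n)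

-- ===== LEMMAS AND PROOFS =====
theorem pv_step_zero (l : List Int) :
    l.foldl (fun mul i => if i == 1 then mul * 9 else mul * (9 - i + 2)) 0 = 0 := by
  induction l with
  | nil => rfl
  | cons x xs ih =>
      simp only [List.foldl_cons]
      split <;> simpa using ih

-- ===== VERDICT (by name: the statement is the Claim_ definition above) =====
theorem no_of_lines_spec : Claim_equal_no_of_lines := by
  intro n _
  unfold Spec_no_of_lines no_of_lines no_of_lines_alt
  rcases lt_trichotomy n 0 with hneg | hz | hpos
  · rw [PySem.List.pyRange_one_eq_nil (by omega)]
    simp [hneg, pvTable, PySem.List.pyGetD]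
  · subst hz; decide
  · by_cases hle : n ≤ 10
    · interval_cases n <;> decide
    · rw [PySem.List.pyRange_one_append 1 12 (n + 1) (by omega) (by omega),
        List.foldl_append]
      have h12 : (PySem.List.pyRange 1 12 1).foldl
          (fun mul i => if i == 1 then mul * 9 else mul * (9 - i + 2)) 1 = 0 := by decide
      rw [h12, pv_step_zero]
      simp only [if_neg (show ¬ n < 0 by omega), if_pos (show n > 10 by omega)]
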